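-- pv_equiv track=rewrite | github.com/lemon-peach/Curve-grpah-for-Data-visualization | Bezier.py | separate_coordinate
-- ===== SOURCE A (Python) =====
-- def separate_coordinate(coordinate_list):
--     axis_num = len(coordinate_list[0])
--     result = []
--     for which_axis in range(axis_num):
--         axis = []
--         for coordinate in coordinate_list:
--             axis.append(coordinate[which_axis])
--         result.append(axis)
--     return result
-- ===== SOURCE B (Python) =====
-- def separate_coordinate(coordinate_list):
--     axis_num = len(coordinate_list[0])
--
--     def transpose(rows):
--         if not rows:
--             return [[] for _ in range(axis_num)]
--         rest = transpose(rows[1:])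
--         return [[rows[0][i]] + rest[i] for i in range(axis_num)]
--
--     return transpose(coordinate_list)
-- ===== Notes on version B (the rewrite author's own statement) =====
-- stated objective: alternative
-- what changed: B transposes by structural recursion on the row list, building each column back-to-front by prepending the current row's entries onto the recursively transposed tail, instead of A's iterative axis-by-axis rescans of the whole list with appends.
import Mathlib
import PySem

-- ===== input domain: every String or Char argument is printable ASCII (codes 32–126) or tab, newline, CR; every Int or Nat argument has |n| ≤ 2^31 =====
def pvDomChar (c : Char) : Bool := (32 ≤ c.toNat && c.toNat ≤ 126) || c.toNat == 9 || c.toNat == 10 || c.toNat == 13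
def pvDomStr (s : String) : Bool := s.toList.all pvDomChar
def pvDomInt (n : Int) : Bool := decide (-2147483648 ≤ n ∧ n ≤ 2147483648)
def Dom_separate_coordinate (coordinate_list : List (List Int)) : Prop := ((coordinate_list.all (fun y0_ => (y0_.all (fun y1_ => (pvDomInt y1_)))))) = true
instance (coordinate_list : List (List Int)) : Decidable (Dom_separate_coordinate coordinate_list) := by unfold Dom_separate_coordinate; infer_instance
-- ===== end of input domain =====

-- B transposes by structural recursion on the row list, prepending onto the transposed tail,
-- instead of A's iterative per-axis rescans; equivalence is about the return value.

-- ===== PORT A =====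
-- literal transliteration of A: axis_num = len(coordinate_list[0]); outer loop over axes,
-- inner loop appends coordinate[which_axis]. Indexing is ported with pyGetD (default 0 / []);
-- Pre_ below excludes exactly the inputs where the Python indexing raises.
def separate_coordinate (coordinate_list : List (List Int)) : List (List Int) :=
  let axis_num := (PySem.List.pyGetD coordinate_list 0 []).length
  (List.range axis_num).foldl
    (fun result (which_axis : Nat) =>
      result ++ [coordinate_list.foldl
        (fun axis coordinate => axis ++ [PySem.List.pyGetD coordinate (which_axis : Int) 0]) []])
    []

-- ===== PORT B =====
-- helper: Source B's inner 'transpose' — recursion on the row list; base case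
-- [[] for _ in range(axis_num)]; step prepends rows[0][i] onto rest[i].
def sepTranspose (axis_num : Nat) (rows : List (List Int)) : List (List Int) :=
  match rows with
  | [] => (List.range axis_num).map (fun _ => ([] : List Int))
  | r :: rest =>
    let restT := sepTranspose axis_num rest
    (List.range axis_num).map
      (fun (i : Nat) => [PySem.List.pyGetD r (i : Int) 0] ++ PySem.List.pyGetD restT (i : Int) [])

-- literal transliteration of Source B: axis_num = len(coordinate_list[0]); return transpose(coordinate_list)
def separate_coordinate_alt (coordinate_list : List (List Int)) : List (List Int) :=
  sepTranspose (PySem.List.pyGetD coordinate_list 0 []).length coordinate_list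

-- ===== PRECONDITION & SPEC =====
-- Pre_ excludes exactly the inputs on which the Python A raises IndexError:
-- the empty list (coordinate_list[0]) and ragged inputs with a row shorter than the first row.
def Pre_separate_coordinate (coordinate_list : List (List Int)) : Prop :=
  coordinate_list ≠ [] ∧
    ∀ row ∈ coordinate_list, (coordinate_list.headD []).length ≤ row.length
instance (coordinate_list : List (List Int)) : Decidable (Pre_separate_coordinate coordinate_list) := by unfold Pre_separate_coordinate; infer_instance
def pvWitness_separate_coordinate : List (List Int) := [[1, 2], [3, 4], [5, 6]]

def Spec_separate_coordinate (coordinate_list : List (List Int)) (out : List (List Int)) : Prop := out = separate_coordinate_alt coordinate_list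
instance (coordinate_list : List (List Int)) (out : List (List Int)) : Decidable (Spec_separate_coordinate coordinate_list out) := by unfold Spec_separate_coordinate; infer_instance

-- ===== CLAIM =====
def Claim_equal_separate_coordinate : Prop := ∀ (coordinate_list : List (List Int)), Dom_separate_coordinate coordinate_list → Pre_separate_coordinate coordinate_list → Spec_separate_coordinate coordinate_list (separate_coordinate coordinate_list)

-- ===== LEMMAS AND PROOFS =====

-- A's nested append loops are maps: A = (range n).map (column i of cl)
theorem separate_coordinate_eq_map (cl : List (List Int)) :
    separate_coordinate cl =
      (List.range (PySem.List.pyGetD cl 0 []).length).map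
        (fun (i : Nat) => cl.map (fun c => PySem.List.pyGetD c (i : Int) 0)) := by
  simp only [separate_coordinate]
  simp only [PySem.List.foldl_append_singleton_eq_map, List.nil_append]

-- B's recursion computes the same columns: sepTranspose n rows = (range n).map (column i of rows)
theorem sepTranspose_eq_map (n : Nat) (rows : List (List Int)) :
    sepTranspose n rows =
      (List.range n).map (fun (i : Nat) => rows.map (fun c => PySem.List.pyGetD c (i : Int) 0)) := by
  induction rows with
  | nil => simp [sepTranspose]
  | cons r rest ih =>
    simp only [sepTranspose, ih]
    apply List.map_congr_left
    intro i hi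
    rw [List.mem_range] at hi
    have hg : PySem.List.pyGetD
        ((List.range n).map (fun (i : Nat) => rest.map (fun c => PySem.List.pyGetD c (i : Int) 0)))
        (i : Int) [] = rest.map (fun c => PySem.List.pyGetD c (i : Int) 0) := by
      rw [PySem.List.pyGetD_natCast]
      simp [List.getD, hi]
    rw [hg]
    simp

-- ===== VERDICT =====
theorem separate_coordinate_spec : Claim_equal_separate_coordinate := by
  intro cl _ _
  unfold Spec_separate_coordinate separate_coordinate_alt
  rw [separate_coordinate_eq_map, sepTranspose_eq_map]
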